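-- pv_equiv track=rewrite | github.com/seanjmartin/ibkr-mcp-server | ibkr_mcp_server/documentation/doc_processor.py | _format_documentation
-- ===== SOURCE A (Python) =====
-- from typing import Dict, Optional, List
--
-- def _format_documentation(sections: Dict, aspect: str) -> str:
--     """Format documentation based on requested aspect."""
--     if aspect == "all":
--         # Return all sections formatted
--         formatted_sections = []
--         section_order = ['overview', 'parameters', 'examples', 'workflow', 'troubleshooting', 'related tools']
--
--         for section_name in section_order:
--             if section_name in sections:
--                 formatted_sections.append(f"## {section_name.title()}\n{sections[section_name]}")
--
--         # Add any remaining sections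
--         for section_name, content in sections.items():
--             if section_name not in section_order:
--                 formatted_sections.append(f"## {section_name.title()}\n{content}")
--
--         return '\n\n'.join(formatted_sections)
--
--     # Return specific aspect
--     aspect_key = aspect.lower().replace('_', ' ')
--     if aspect_key in sections:
--         return f"## {aspect_key.title()}\n{sections[aspect_key]}"
--     else:
--         available = ', '.join(sections.keys())
--         return f"Section '{aspect}' not found. Available sections: {available}"
-- ===== SOURCE B (Python) =====
-- def _format_documentation(sections, aspect):
--     """Format documentation based on requested aspect."""
--     if aspect == "all":
--         section_order = ['overview', 'parameters', 'examples', 'workflow', 'troubleshooting', 'related tools']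
--         def rank(name):
--             return section_order.index(name) if name in section_order else len(section_order)
--         ordered = sorted(sections.items(), key=lambda kv: rank(kv[0]))
--         return '\n\n'.join(f"## {name.title()}\n{content}" for name, content in ordered)
--
--     aspect_key = aspect.lower().replace('_', ' ')
--     if aspect_key in sections:
--         return f"## {aspect_key.title()}\n{sections[aspect_key]}"
--     else:
--         available = ', '.join(sections.keys())
--         return f"Section '{aspect}' not found. Available sections: {available}"
-- ===== Notes on version B (the rewrite author's own statement) =====
-- stated objective: alternative
-- what changed: The 'all' branch's two filtered scans (priority names first, then leftover dict entries) are replaced by a single stable sort of sections.items() under a rank key (index in section_order, or len(section_order) for unknown names), formatted in one pass.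
import Mathlib
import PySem

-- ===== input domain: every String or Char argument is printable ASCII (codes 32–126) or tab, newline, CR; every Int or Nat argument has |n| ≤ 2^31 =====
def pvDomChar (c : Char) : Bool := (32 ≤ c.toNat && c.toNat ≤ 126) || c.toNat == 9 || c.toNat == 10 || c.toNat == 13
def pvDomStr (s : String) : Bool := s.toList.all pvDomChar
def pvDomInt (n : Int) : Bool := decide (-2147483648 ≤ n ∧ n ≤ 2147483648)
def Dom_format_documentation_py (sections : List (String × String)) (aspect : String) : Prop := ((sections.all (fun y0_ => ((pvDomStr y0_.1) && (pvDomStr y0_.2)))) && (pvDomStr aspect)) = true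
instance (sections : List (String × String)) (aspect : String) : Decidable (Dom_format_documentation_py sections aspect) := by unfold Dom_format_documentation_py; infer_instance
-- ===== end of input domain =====

-- B replaces A's two filtered scans in the 'all' branch by one stable sort under a rank key; same return value (alternative decomposition, no speed claim).

-- shared primitive helpers (both Pythons use the same f-strings / dict lookups)
-- str.title(), exact on the ASCII domain (there 'cased' = isalpha)
def pvTitleAux : Bool → List Char → List Char
  | _, [] => []
  | prevAlpha, c :: rest =>
    (if prevAlpha then PySem.Chars.lowerChar c else PySem.Chars.upperChar c) ::
      pvTitleAux (PySem.Chars.isalpha c) rest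

def pvTitle (s : String) : String := String.ofList (pvTitleAux false s.toList)

-- f"## {name.title()}\n{content}"
def pvFmtSection (name content : String) : String := "## " ++ pvTitle name ++ "\n" ++ content

-- sections[k] for a dict with the key present (first match; Pre_ gives unique keys)
def pvGetItem (sections : List (String × String)) (k : String) : String :=
  ((sections.find? (fun p => p.1 == k)).map Prod.snd).getD ""

def pvOrder : List String :=
  ["overview", "parameters", "examples", "workflow", "troubleshooting", "related tools"]

-- ===== PORT A =====
def format_documentation_py (sections : List (String × String)) (aspect : String) : String :=
  if aspect == "all" then
    -- first loop: priority names present in the dict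
    let fs1 : List String := pvOrder.foldl (fun acc name =>
      if (sections.map Prod.fst).contains name then
        acc ++ [pvFmtSection name (pvGetItem sections name)]
      else acc) []
    -- second loop: remaining sections in dict order
    let fs2 : List String := sections.foldl (fun acc kv =>
      if !(pvOrder.contains kv.1) then acc ++ [pvFmtSection kv.1 kv.2] else acc) fs1
    PySem.Str.join "\n\n" fs2
  else
    let aspectKey := PySem.Str.replace (PySem.Str.lower aspect) "_" " "
    if (sections.map Prod.fst).contains aspectKey then
      pvFmtSection aspectKey (pvGetItem sections aspectKey)
    else
      "Section '" ++ aspect ++ "' not found. Available sections: " ++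
        PySem.Str.join ", " (sections.map Prod.fst)

-- ===== PORT B =====
-- rank(name) = section_order.index(name) if name in section_order else len(section_order)
def pvRank (name : String) : Nat :=
  if pvOrder.contains name then (PySem.List.index? pvOrder name).getD pvOrder.length
  else pvOrder.length

def format_documentation_py_alt (sections : List (String × String)) (aspect : String) : String :=
  if aspect == "all" then
    let ordered := PySem.List.sorted sections (fun kv => pvRank kv.1) false
    PySem.Str.join "\n\n" (ordered.map (fun kv => pvFmtSection kv.1 kv.2))
  else
    let aspectKey := PySem.Str.replace (PySem.Str.lower aspect) "_" " "
    if (sections.map Prod.fst).contains aspectKey then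
      pvFmtSection aspectKey (pvGetItem sections aspectKey)
    else
      "Section '" ++ aspect ++ "' not found. Available sections: " ++
        PySem.Str.join ", " (sections.map Prod.fst)

-- ===== PRECONDITION & SPEC =====
-- Pre_ excludes association lists with duplicate keys: they do not represent a Python dict
-- (the parameter is a dict, whose keys are unique), so the assoc-list reading is ambiguous there.
def Pre_format_documentation_py (sections : List (String × String)) (aspect : String) : Prop :=
  (sections.map Prod.fst).Nodup

instance (sections : List (String × String)) (aspect : String) : Decidable (Pre_format_documentation_py sections aspect) := by unfold Pre_format_documentation_py; infer_instance

def pvWitness_format_documentation_py : (List (String × String)) × String :=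
  ([("overview", "intro text"), ("zeta", "extra")], "all")

def Spec_format_documentation_py (sections : List (String × String)) (aspect : String) (out : String) : Prop := out = format_documentation_py_alt sections aspect
instance (sections : List (String × String)) (aspect : String) (out : String) : Decidable (Spec_format_documentation_py sections aspect out) := by unfold Spec_format_documentation_py; infer_instance

-- ===== CLAIM (what is proved, stated in full; the proofs are below) =====
def Claim_equal_format_documentation_py : Prop := ∀ (sections : List (String × String)) (aspect : String), Dom_format_documentation_py sections aspect → Pre_format_documentation_py sections aspect → Spec_format_documentation_py sections aspect (format_documentation_py sections aspect)

-- ===== LEMMAS AND PROOFS =====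

lemma pv_insertBy_append {α : Type} (before : α → α → Bool) (x : α) (l1 l2 : List α)
    (h1 : ∀ a ∈ l1, before x a = false) (h2 : ∀ b ∈ l2, before x b = true) :
    PySem.List.insertBy before x (l1 ++ l2) = l1 ++ x :: l2 := by
  induction l1 with
  | nil =>
    cases l2 with
    | nil => simp [PySem.List.insertBy]
    | cons b t => simp [PySem.List.insertBy, h2 b (by simp)]
  | cons a t ih =>
    have ha : before x a = false := h1 a (by simp)
    simp [PySem.List.insertBy, ha]
    exact ih (fun a ha' => h1 a (by simp [ha']))

-- the stable insertion sort under a Nat key bounded by B is the concatenation of the key classes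
lemma pv_sorted_partition {α : Type} (key : α → Nat) (B : Nat) (xs : List α)
    (h : ∀ x ∈ xs, key x ≤ B) :
    PySem.List.sorted xs key false
      = (List.range' 0 (B + 1)).flatMap (fun i => xs.filter (fun x => key x == i)) := by
  rw [PySem.List.sorted_eq_foldl_insertBy]
  induction xs using List.reverseRecOn with
  | nil => simp
  | append_singleton ys x ih =>
    have hys : ∀ y ∈ ys, key y ≤ B := fun y hy => h y (by simp [hy])
    have hx : key x ≤ B := h x (by simp)
    rw [List.foldl_append, List.foldl_cons, List.foldl_nil, ih hys]
    set k := key x with hk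
    have hsplit : List.range' 0 (B + 1) = List.range' 0 (k + 1) ++ List.range' (k + 1) (B - k) := by
      have := @List.range'_append 0 (k + 1) (B - k) 1
      simp at this
      rw [this]
      congr 1
      omega
    rw [hsplit, List.flatMap_append, List.flatMap_append]
    rw [pv_insertBy_append]
    · have hA : ∀ (l : List Nat), (∀ i ∈ l, i ≠ k) →
          l.flatMap (fun i => (ys ++ [x]).filter (fun y => key y == i))
            = l.flatMap (fun i => ys.filter (fun y => key y == i)) := by
        intro l hl
        induction l with
        | nil => simp
        | cons i t iht =>
          have hik : (key x == i) = false := by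
            have hne : i ≠ k := hl i (by simp)
            simp [← hk]
            exact fun hh => hne hh.symm
          simp only [List.flatMap_cons]
          rw [iht (fun j hj => hl j (by simp [hj]))]
          simp [List.filter_append, hik]
      have h2' := hA (List.range' (k + 1) (B - k)) (by
        intro i hi
        simp [List.mem_range'] at hi
        omega)
      have hr1 : List.range' 0 (k + 1) = List.range' 0 k ++ [k] := by
        have := @List.range'_append 0 k 1 1
        simp at this
        rw [← this]
      have h1' : (List.range' 0 (k + 1)).flatMap (fun i => (ys ++ [x]).filter (fun y => key y == i))
          = (List.range' 0 (k + 1)).flatMap (fun i => ys.filter (fun y => key y == i)) ++ [x] := by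
        rw [hr1, List.flatMap_append, List.flatMap_append]
        rw [hA (List.range' 0 k) (by intro i hi; simp [List.mem_range'] at hi; omega)]
        simp [List.filter_append, List.filter_singleton, ← hk, List.append_assoc]
      rw [h1', h2']
      simp
    · intro a hamem
      simp only [List.mem_flatMap, List.mem_filter, List.mem_range'] at hamem
      obtain ⟨i, hi, _, hkey⟩ := hamem
      simp at hkey
      simp [hkey]
      omega
    · intro b hbmem
      simp only [List.mem_flatMap, List.mem_filter, List.mem_range'] at hbmem
      obtain ⟨i, hi, _, hkey⟩ := hbmem
      simp at hkey
      simp [hkey]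
      omega

-- under unique keys, filtering by one key yields the singleton the dict lookup sees
lemma pv_filter_key_singleton (sections : List (String × String))
    (h : (sections.map Prod.fst).Nodup) (n : String) :
    sections.filter (fun kv => kv.1 == n)
      = if (sections.map Prod.fst).contains n then [(n, pvGetItem sections n)] else [] := by
  induction sections with
  | nil => simp
  | cons kv t ih =>
    simp only [List.map_cons, List.nodup_cons] at h
    obtain ⟨hnk, hnd⟩ := h
    by_cases hkn : kv.1 = n
    · subst hkn
      have hfilt : t.filter (fun kv' => kv'.1 == kv.1) = [] := by
        rw [List.filter_eq_nil_iff]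
        intro a ha
        simp
        exact fun hh => hnk (hh ▸ List.mem_map_of_mem ha)
      simp [hfilt, pvGetItem]
    · have hne : (kv.1 == n) = false := by simp [hkn]
      rw [List.filter_cons]
      simp only [hne, Bool.false_eq_true, if_false]
      rw [ih hnd]
      have hnk2 : (n == kv.1) = false := by
        simp
        exact fun hh => hkn hh.symm
      simp only [pvGetItem, List.find?_cons, hne]
      have hcc : (kv.1 :: List.map Prod.fst t).contains n = (List.map Prod.fst t).contains n := by
        rw [List.contains_cons, hnk2]
        simp
      rw [List.map_cons, hcc]

lemma pvRank_eq (n : String) :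
    pvRank n = (if n == "overview" then 0 else if n == "parameters" then 1 else
      if n == "examples" then 2 else if n == "workflow" then 3 else
      if n == "troubleshooting" then 4 else if n == "related tools" then 5 else 6) := by
  unfold pvRank pvOrder
  simp [PySem.List.index?, List.idxOf?, List.findIdx?]
  split_ifs <;> simp_all <;> rfl

lemma pvRank_le (n : String) : pvRank n ≤ 6 := by
  rw [pvRank_eq]
  split_ifs <;> omega

lemma pv_map_filter_cons {α β : Type} (g : α → β) (q : α → Bool) (a : α) (l : List α) :
    List.map g (List.filter q (a :: l)) = (if q a then [g a] else []) ++ List.map g (List.filter q l) := by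
  by_cases h : q a <;> simp [h]

lemma pv_map_ite_singleton {α β : Type} (f : α → β) (c : Prop) [Decidable c] (x : α) :
    List.map f (if c then [x] else []) = if c then [f x] else [] := by
  split <;> simp

-- ===== VERDICT (by name: the statement is the Claim_ definition above) =====
theorem format_documentation_py_spec : Claim_equal_format_documentation_py := by
  intro sections aspect _hdom hpre
  unfold Spec_format_documentation_py format_documentation_py format_documentation_py_alt
  by_cases hall : (aspect == "all") = true
  · simp only [hall, if_true]
    congr 1
    simp only [PySem.List.foldl_append_if]
    rw [pv_sorted_partition (fun kv => pvRank kv.1) 6 sections (fun kv _ => pvRank_le kv.1)]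
    have hrange : List.range' 0 7 = [0, 1, 2, 3, 4, 5, 6] := rfl
    rw [hrange]
    simp only [List.flatMap_cons, List.flatMap_nil, List.map_append, List.append_nil,
      List.nil_append]
    have hcls : ∀ (nm : String) (i : Nat), (∀ s : String, (pvRank s == i) = (s == nm)) →
        sections.filter (fun kv => pvRank kv.1 == i) = sections.filter (fun kv => kv.1 == nm) := by
      intro nm i hp
      apply List.filter_congr
      intro kv _
      exact hp kv.1
    have p0 : ∀ s : String, (pvRank s == 0) = (s == "overview") := by
      intro s; rw [pvRank_eq]; split_ifs <;> simp_all
    have p1 : ∀ s : String, (pvRank s == 1) = (s == "parameters") := by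
      intro s; rw [pvRank_eq]; split_ifs <;> simp_all
    have p2 : ∀ s : String, (pvRank s == 2) = (s == "examples") := by
      intro s; rw [pvRank_eq]; split_ifs <;> simp_all
    have p3 : ∀ s : String, (pvRank s == 3) = (s == "workflow") := by
      intro s; rw [pvRank_eq]; split_ifs <;> simp_all
    have p4 : ∀ s : String, (pvRank s == 4) = (s == "troubleshooting") := by
      intro s; rw [pvRank_eq]; split_ifs <;> simp_all
    have p5 : ∀ s : String, (pvRank s == 5) = (s == "related tools") := by
      intro s; rw [pvRank_eq]; split_ifs <;> simp_all
    have h6 : sections.filter (fun kv => pvRank kv.1 == 6)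
        = sections.filter (fun kv => !(pvOrder.contains kv.1)) := by
      apply List.filter_congr
      intro kv _
      rw [pvRank_eq]
      simp [pvOrder]
      split_ifs <;> simp_all
    rw [hcls "overview" 0 p0, hcls "parameters" 1 p1, hcls "examples" 2 p2,
        hcls "workflow" 3 p3, hcls "troubleshooting" 4 p4, hcls "related tools" 5 p5, h6]
    rw [pv_filter_key_singleton sections hpre "overview",
        pv_filter_key_singleton sections hpre "parameters",
        pv_filter_key_singleton sections hpre "examples",
        pv_filter_key_singleton sections hpre "workflow",
        pv_filter_key_singleton sections hpre "troubleshooting",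
        pv_filter_key_singleton sections hpre "related tools"]
    simp only [pvOrder]
    simp only [pv_map_filter_cons, List.filter_nil, List.map_nil, pv_map_ite_singleton,
      List.append_nil, List.append_assoc]
  · rw [if_neg hall, if_neg hall]
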